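-- pv_equiv track=rewrite | github.com/carlos-arcas/Horas_Sindicales | scripts/auditar_clean_architecture.py | _detectar_capa_modulo
-- ===== SOURCE A (Python) =====
-- def _detectar_capa_modulo(
--     modulo: str, prefixes: dict[str, tuple[str, ...]]
-- ) -> str | None:
--     for capa, prefijos in prefixes.items():
--         if any(
--             modulo == prefijo or modulo.startswith(f"{prefijo}.")
--             for prefijo in prefijos
--         ):
--             return capa
--     return None
-- ===== SOURCE B (Python) =====
-- def _detectar_capa_modulo(modulo, prefixes):
--     # Precompute the set of dotted ancestor prefixes of `modulo` once,
--     # then each layer check is a set membership test per prefix.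
--     parts = modulo.split(".")
--     acc = parts[0]
--     ancestors = {acc}
--     for seg in parts[1:]:
--         acc = acc + "." + seg
--         ancestors.add(acc)
--     for capa, prefijos in prefixes.items():
--         if any(p in ancestors for p in prefijos):
--             return capa
--     return None
-- ===== Notes on version B (the rewrite author's own statement) =====
-- stated objective: alternative
-- what changed: Instead of testing modulo against every prefix with == / startswith, B splits modulo once into its dotted ancestor prefixes, builds a set of them, and each layer's prefixes are checked by set membership (first matching layer wins, as in A).
import Mathlib
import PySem

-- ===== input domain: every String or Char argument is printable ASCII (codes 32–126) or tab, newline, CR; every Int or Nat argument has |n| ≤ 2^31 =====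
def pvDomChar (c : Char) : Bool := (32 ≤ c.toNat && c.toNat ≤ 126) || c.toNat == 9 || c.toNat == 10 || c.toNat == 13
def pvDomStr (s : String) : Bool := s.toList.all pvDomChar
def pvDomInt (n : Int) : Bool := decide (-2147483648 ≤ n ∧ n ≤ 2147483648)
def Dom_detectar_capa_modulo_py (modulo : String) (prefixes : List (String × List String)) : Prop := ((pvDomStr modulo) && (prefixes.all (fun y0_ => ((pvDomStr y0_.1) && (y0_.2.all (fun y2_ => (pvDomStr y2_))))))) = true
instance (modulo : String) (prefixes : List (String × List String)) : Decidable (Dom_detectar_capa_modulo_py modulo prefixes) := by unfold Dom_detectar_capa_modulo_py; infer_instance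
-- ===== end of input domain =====

-- B replaces A's per-prefix startswith scan by one precomputed set of dotted
-- ancestor prefixes of `modulo`, tested by membership (alternative algorithm).


-- ===== PORT A =====
-- the for-loop over prefixes.items() with early return
def pvAScan (modulo : String) : List (String × List String) → Option String
  | [] => none
  | (capa, prefijos) :: rest =>
    if prefijos.any (fun prefijo =>
        modulo == prefijo || PySem.Str.startswith modulo (prefijo ++ ".")) then
      some capa
    else pvAScan modulo rest

def detectar_capa_modulo_py (modulo : String) (prefixes : List (String × List String)) : Option String :=
  pvAScan modulo prefixes

-- ===== PORT B =====
-- the for-loop building the ancestor set: state = (acc, ancestors)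
def pvBAddAll : List (List Char) → List Char → PySem.Set (List Char) → PySem.Set (List Char)
  | [], _, s => s
  | seg :: rest, acc, s => pvBAddAll rest (acc ++ '.' :: seg) (s.add (acc ++ '.' :: seg))

-- the for-loop over prefixes.items() with early return, membership in the set
def pvBScan (anc : PySem.Set (List Char)) : List (String × List String) → Option String
  | [] => none
  | (capa, prefijos) :: rest =>
    if prefijos.any (fun p => anc.contains p.toList) then some capa
    else pvBScan anc rest

def detectar_capa_modulo_py_alt (modulo : String) (prefixes : List (String × List String)) : Option String :=
  match PySem.Chars.splitOn modulo.toList ['.'] with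
  | [] => none   -- unreachable: split with a nonempty separator yields at least one part
  | acc :: rest => pvBScan (pvBAddAll rest acc (PySem.Set.ofList [acc])) prefixes

-- ===== PRECONDITION & SPEC =====
def Spec_detectar_capa_modulo_py (modulo : String) (prefixes : List (String × List String)) (out : Option String) : Prop := out = detectar_capa_modulo_py_alt modulo prefixes
instance (modulo : String) (prefixes : List (String × List String)) (out : Option String) : Decidable (Spec_detectar_capa_modulo_py modulo prefixes out) := by unfold Spec_detectar_capa_modulo_py; infer_instance

-- ===== CLAIM (what is proved, stated in full; the proofs are below) =====
def Claim_equal_detectar_capa_modulo_py : Prop := ∀ (modulo : String) (prefixes : List (String × List String)), Dom_detectar_capa_modulo_py modulo prefixes → Spec_detectar_capa_modulo_py modulo prefixes (detectar_capa_modulo_py modulo prefixes)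

-- ===== LEMMAS AND PROOFS =====

-- structural version of PySem.Chars.splitOn for separator "."
def pvSplit : List Char → List Char → List (List Char)
  | [], cur => [cur.reverse]
  | c :: rest, cur => if c = '.' then cur.reverse :: pvSplit rest [] else pvSplit rest (c :: cur)

theorem pvSplit_go (cs : List Char) : ∀ (fuel : Nat), cs.length < fuel → ∀ (cur : List Char) (acc : List (List Char)),
    PySem.Chars.splitOn.go ['.'] fuel cs cur acc = acc.reverse ++ pvSplit cs cur := by
  induction cs with
  | nil =>
    intro fuel hf cur acc
    match fuel, hf with
    | fuel + 1, _ => rw [PySem.Chars.splitOn.go.eq_def]; simp [pvSplit]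
  | cons c rest ih =>
    intro fuel hf cur acc
    match fuel, hf with
    | fuel + 1, hf =>
      have hlt : rest.length < fuel := by
        simp only [List.length_cons] at hf; omega
      by_cases hc : c = '.'
      · subst hc
        have hstep : PySem.Chars.splitOn.go ['.'] (fuel+1) ('.' :: rest) cur acc
            = PySem.Chars.splitOn.go ['.'] fuel rest [] (cur.reverse :: acc) := by
          rw [PySem.Chars.splitOn.go.eq_def]
          simp [List.isPrefixOf]
        rw [hstep, ih fuel hlt [] (cur.reverse :: acc)]
        simp [pvSplit]
      · have hstep : PySem.Chars.splitOn.go ['.'] (fuel+1) (c :: rest) cur acc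
            = PySem.Chars.splitOn.go ['.'] fuel rest (c :: cur) acc := by
          rw [PySem.Chars.splitOn.go.eq_def]
          simp [List.isPrefixOf, Ne.symm hc]
        rw [hstep, ih fuel hlt (c :: cur) acc]
        simp [pvSplit, hc]

theorem splitOn_eq_pvSplit (cs : List Char) : PySem.Chars.splitOn cs ['.'] = pvSplit cs [] := by
  unfold PySem.Chars.splitOn
  rw [pvSplit_go cs (cs.length + 1) (by omega) [] []]
  rfl

theorem pvSplit_ne_nil (cs cur : List Char) : pvSplit cs cur ≠ [] := by
  induction cs generalizing cur with
  | nil => simp [pvSplit]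
  | cons c rest ih => simp only [pvSplit]; split_ifs <;> simp [ih]

theorem pvSplit_no_dot (cs : List Char) (h : '.' ∉ cs) : ∀ cur, pvSplit cs cur = [cur.reverse ++ cs] := by
  induction cs with
  | nil => simp [pvSplit]
  | cons c rest ih =>
    intro cur
    simp only [List.mem_cons, not_or] at h
    simp [pvSplit, Ne.symm h.1, ih h.2]

theorem pvSplit_dot (a b : List Char) (ha : '.' ∉ a) : ∀ cur, pvSplit (a ++ '.' :: b) cur = (cur.reverse ++ a) :: pvSplit b [] := by
  induction a with
  | nil => simp [pvSplit]
  | cons c rest ih =>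
    intro cur
    simp only [List.mem_cons, not_or] at ha
    simp [pvSplit, Ne.symm ha.1, ih ha.2]

-- proof-side list of ancestors produced by the adding loop
def pvAncL : List (List Char) → List Char → List (List Char)
  | [], _ => []
  | seg :: rest, acc => (acc ++ '.' :: seg) :: pvAncL rest (acc ++ '.' :: seg)

theorem mem_pvBAddAll (rest : List (List Char)) : ∀ (acc : List Char) (s : PySem.Set (List Char)) (x : List Char),
    x ∈ pvBAddAll rest acc s ↔ x ∈ s ∨ x ∈ pvAncL rest acc := by
  induction rest with
  | nil => simp [pvBAddAll, pvAncL]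
  | cons seg rest ih =>
    intro acc s x
    simp [pvBAddAll, pvAncL, ih, PySem.Set.mem_add]
    tauto

theorem pvAncL_shift (rest : List (List Char)) : ∀ (pre acc : List Char),
    pvAncL rest (pre ++ acc) = (pvAncL rest acc).map (fun y => pre ++ y) := by
  induction rest with
  | nil => simp [pvAncL]
  | cons seg rest ih =>
    intro pre acc
    show ((pre ++ acc) ++ '.' :: seg) :: pvAncL rest ((pre ++ acc) ++ '.' :: seg)
       = List.map (fun y => pre ++ y) ((acc ++ '.' :: seg) :: pvAncL rest (acc ++ '.' :: seg))
    rw [List.map_cons]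
    congr 1
    · simp
    · rw [List.append_assoc, ih]

-- the full ancestor list of cs
def pvAncAll (cs : List Char) : List (List Char) :=
  match pvSplit cs [] with
  | [] => []
  | h :: t => h :: pvAncL t h

theorem no_dot_no_prefix (cs x : List Char) (h : '.' ∉ cs) : ¬ (x ++ ['.'] <+: cs) := by
  intro hp
  exact h (hp.subset (by simp))

theorem prefix_dot (a : List Char) (ha : '.' ∉ a) : ∀ (b x : List Char),
    (x ++ ['.'] <+: a ++ '.' :: b) ↔ (x = a ∨ ∃ y, x = a ++ '.' :: y ∧ y ++ ['.'] <+: b) := by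
  induction a with
  | nil =>
    intro b x
    cases x with
    | nil => simp
    | cons c x' => simp [List.cons_prefix_cons, and_comm]
  | cons c a' ih =>
    intro b x
    simp only [List.mem_cons, not_or] at ha
    cases x with
    | nil =>
      simp only [List.nil_append, List.cons_append, List.cons_prefix_cons]
      constructor
      · rintro ⟨h1, -⟩; exact absurd h1 ha.1
      · rintro (h | ⟨y, h, -⟩) <;> simp_all
    | cons d x' =>
      simp only [List.cons_append, List.cons_prefix_cons, ih ha.2 b x', List.cons.injEq]
      constructor
      · rintro ⟨rfl, h | ⟨y, rfl, hy⟩⟩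
        · exact Or.inl ⟨rfl, h⟩
        · exact Or.inr ⟨y, ⟨rfl, rfl⟩, hy⟩
      · rintro (⟨rfl, rfl⟩ | ⟨y, ⟨rfl, rfl⟩, hy⟩)
        · exact ⟨rfl, Or.inl rfl⟩
        · exact ⟨rfl, Or.inr ⟨y, rfl, hy⟩⟩

theorem pvDecomp (cs : List Char) (hd : '.' ∈ cs) : ∃ a b, '.' ∉ a ∧ cs = a ++ '.' :: b := by
  induction cs with
  | nil => simp at hd
  | cons c rest ih =>
    by_cases hc : c = '.'
    · exact ⟨[], rest, by simp, by simp [hc]⟩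
    · have hr : '.' ∈ rest := by
        rcases List.mem_cons.mp hd with h | h
        · exact absurd h.symm hc
        · exact h
      obtain ⟨a, b, ha, hab⟩ := ih hr
      exact ⟨c :: a, b, by simp [ha]; exact fun h => hc h.symm, by simp [hab]⟩

theorem mem_pvAncAll (cs : List Char) : ∀ (x : List Char), x ∈ pvAncAll cs ↔ (x = cs ∨ x ++ ['.'] <+: cs) := by
  intro x
  by_cases hd : '.' ∈ cs
  · obtain ⟨a, b, ha, hb⟩ := pvDecomp cs hd
    have hlen : b.length < cs.length := by simp [hb]; omega
    have ih := mem_pvAncAll b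
    -- compute pvAncAll cs
    obtain ⟨hb', tb, hsb⟩ : ∃ hb' tb, pvSplit b [] = hb' :: tb := by
      cases hsb : pvSplit b [] with
      | nil => exact absurd hsb (pvSplit_ne_nil b [])
      | cons h t => exact ⟨h, t, rfl⟩
    have hcs : pvAncAll cs = a :: (pvAncAll b).map (fun y => a ++ '.' :: y) := by
      unfold pvAncAll
      rw [hb, pvSplit_dot a b ha, hsb]
      simp only [List.reverse_nil, List.nil_append, pvAncL, List.map_cons]
      congr 1
      congr 1
      have : a ++ '.' :: hb' = (a ++ ['.']) ++ hb' := by simp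
      rw [this, pvAncL_shift]
      apply List.map_congr_left
      intro y _
      simp
    rw [hcs, hb]
    simp only [List.mem_cons, List.mem_map]
    rw [prefix_dot a ha b x]
    constructor
    · rintro (rfl | ⟨y, hy, rfl⟩)
      · exact Or.inr (Or.inl rfl)
      · rcases (ih y).mp hy with rfl | hy'
        · exact Or.inl rfl
        · exact Or.inr (Or.inr ⟨y, rfl, hy'⟩)
    · rintro (rfl | rfl | ⟨y, rfl, hy'⟩)
      · exact Or.inr ⟨b, (ih b).mpr (Or.inl rfl), rfl⟩
      · exact Or.inl rfl
      · exact Or.inr ⟨y, (ih y).mpr (Or.inr hy'), rfl⟩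
  · have : pvAncAll cs = [cs] := by
      unfold pvAncAll
      rw [pvSplit_no_dot cs hd []]
      simp [pvAncL]
    rw [this]
    simp only [List.mem_singleton]
    constructor
    · exact Or.inl
    · rintro (h | h)
      · exact h
      · exact absurd h (no_dot_no_prefix cs x hd)
termination_by cs.length
decreasing_by exact hlen

theorem key_bool (modulo p : String) (acc : List Char) (rest : List (List Char))
    (hsplit : PySem.Chars.splitOn modulo.toList ['.'] = acc :: rest) :
    (modulo == p || PySem.Str.startswith modulo (p ++ ".")) =
      (pvBAddAll rest acc (PySem.Set.ofList [acc])).contains p.toList := by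
  rw [Bool.eq_iff_iff]
  rw [PySem.Set.contains_iff, mem_pvBAddAll]
  have hanc : pvAncAll modulo.toList = acc :: pvAncL rest acc := by
    unfold pvAncAll
    rw [← splitOn_eq_pvSplit, hsplit]
  have hmem := mem_pvAncAll modulo.toList p.toList
  rw [hanc] at hmem
  simp only [List.mem_cons] at hmem
  have hstr : (modulo == p) = true ↔ p.toList = modulo.toList := by
    rw [beq_iff_eq, ← String.toList_inj, eq_comm]
  rw [Bool.or_eq_true, hstr, PySem.Str.startswith_eq, PySem.Chars.startswith_iff,
      String.toList_append]
  have : ("." : String).toList = ['.'] := rfl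
  rw [this]
  rw [PySem.Set.mem_ofList, List.mem_singleton]
  constructor
  · rintro (h | h)
    · rcases hmem.mpr (Or.inl h) with h' | h'
      · exact Or.inl h'
      · exact Or.inr h'
    · rcases hmem.mpr (Or.inr h) with h' | h'
      · exact Or.inl h'
      · exact Or.inr h'
  · intro h
    rcases hmem.mp (by rcases h with h | h; exact Or.inl h; exact Or.inr h) with h' | h'
    · exact Or.inl h'
    · exact Or.inr h'

theorem scan_eq (modulo : String) (acc : List Char) (rest : List (List Char))
    (hsplit : PySem.Chars.splitOn modulo.toList ['.'] = acc :: rest) :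
    ∀ ps : List (String × List String),
      pvAScan modulo ps = pvBScan (pvBAddAll rest acc (PySem.Set.ofList [acc])) ps := by
  intro ps
  induction ps with
  | nil => rfl
  | cons kv ps ih =>
    obtain ⟨capa, prefijos⟩ := kv
    simp only [pvAScan, pvBScan]
    have hany : (prefijos.any fun prefijo => modulo == prefijo || PySem.Str.startswith modulo (prefijo ++ ".")) =
        (prefijos.any fun p => (pvBAddAll rest acc (PySem.Set.ofList [acc])).contains p.toList) := by
      exact List.any_congr rfl (fun p => key_bool modulo p acc rest hsplit)
    rw [hany]
    split_ifs with h
    · rfl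
    · exact ih

-- ===== VERDICT (by name: the statement is the Claim_ definition above) =====
theorem detectar_capa_modulo_py_spec : Claim_equal_detectar_capa_modulo_py := by
  intro modulo prefixes _
  unfold Spec_detectar_capa_modulo_py detectar_capa_modulo_py detectar_capa_modulo_py_alt
  cases hsplit : PySem.Chars.splitOn modulo.toList ['.'] with
  | nil =>
    rw [splitOn_eq_pvSplit] at hsplit
    exact absurd hsplit (pvSplit_ne_nil modulo.toList [])
  | cons acc rest =>
    exact scan_eq modulo acc rest hsplit prefixes
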